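-- pv_equiv track=rewrite | github.com/doemefu/uzh_info1 | 4-loops-more/ip_validation/task/script.py | is_valid_IPv6_hextet
-- ===== SOURCE A (Python) =====
-- def is_valid_IPv6_hextet(hextet):
--     """Returns True if hextet represents a valid IPv6 hextet, False otherwise"""
--     hextet = str(hextet)
--
--     if len(hextet) == 0 or len(hextet) > 4:
--         return False
--
--     for a in hextet:
--         if a not in "abcdefABCDEF1234567890":
--             return False
--
--     return True
-- ===== SOURCE B (Python) =====
-- import re
--
-- _HEXTET_RE = re.compile(r'[0-9a-fA-F]{1,4}')
--
-- def is_valid_IPv6_hextet(hextet):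
--     """Returns True if hextet represents a valid IPv6 hextet, False otherwise"""
--     return bool(_HEXTET_RE.fullmatch(str(hextet)))
-- ===== Notes on version B (the rewrite author's own statement) =====
-- stated objective: idiomatic
-- what changed: Replaces the explicit length guard and per-character membership loop with a single precompiled regular-expression fullmatch of [0-9a-fA-F]{1,4}, delegating both the 1-4 length bound and the hex-digit class to the regex engine.
import Mathlib
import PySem

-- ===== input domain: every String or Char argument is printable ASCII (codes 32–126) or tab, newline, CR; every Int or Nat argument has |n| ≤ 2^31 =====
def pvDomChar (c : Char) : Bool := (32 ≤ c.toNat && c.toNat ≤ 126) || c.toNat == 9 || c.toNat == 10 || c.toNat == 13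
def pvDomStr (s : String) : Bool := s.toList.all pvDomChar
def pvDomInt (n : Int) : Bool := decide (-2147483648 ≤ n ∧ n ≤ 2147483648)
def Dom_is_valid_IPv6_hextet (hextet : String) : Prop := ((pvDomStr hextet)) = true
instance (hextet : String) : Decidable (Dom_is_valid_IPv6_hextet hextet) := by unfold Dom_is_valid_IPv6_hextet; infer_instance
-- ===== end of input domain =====

-- B replaces A's explicit length guard plus per-character membership loop by a single
-- regex-style full match of [0-9a-fA-F]{1,4} (idiomatic; same return value everywhere).

-- ===== PORT A =====
-- the for-loop of A: return False at the first char not in the literal string, else True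
def pvLoopA : List Char → Bool
  | [] => true
  | a :: rest => if ("abcdefABCDEF1234567890".toList.contains a) = false then false else pvLoopA rest

def is_valid_IPv6_hextet (hextet : String) : Bool :=
  -- hextet = str(hextet): identity on a str argument
  if hextet.toList.length = 0 ∨ hextet.toList.length > 4 then false
  else pvLoopA hextet.toList

-- ===== PORT B =====
-- the regex character class [0-9a-fA-F], as its three code-point ranges (as the engine checks it)
def pvHexClass (c : Char) : Bool :=
  ('0' ≤ c && c ≤ '9') || ('a' ≤ c && c ≤ 'f') || ('A' ≤ c && c ≤ 'F')

-- fullmatch of [0-9a-fA-F]{1,4}: between 1 and 4 characters, each in the class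
def is_valid_IPv6_hextet_alt (hextet : String) : Bool :=
  decide (1 ≤ hextet.toList.length) && decide (hextet.toList.length ≤ 4)
    && hextet.toList.all pvHexClass

-- ===== PRECONDITION & SPEC =====
def Spec_is_valid_IPv6_hextet (hextet : String) (out : Bool) : Prop := out = is_valid_IPv6_hextet_alt hextet
instance (hextet : String) (out : Bool) : Decidable (Spec_is_valid_IPv6_hextet hextet out) := by unfold Spec_is_valid_IPv6_hextet; infer_instance

-- ===== CLAIM (what is proved, stated in full; the proofs are below) =====
def Claim_equal_is_valid_IPv6_hextet : Prop := ∀ (hextet : String), Dom_is_valid_IPv6_hextet hextet → Spec_is_valid_IPv6_hextet hextet (is_valid_IPv6_hextet hextet)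

-- ===== LEMMAS AND PROOFS =====
theorem pv_char_mk_eq_iff (v : UInt32) (hv : v.isValidChar) (d : Char) :
    ((⟨v, hv⟩ : Char) = d) ↔ v.toNat = d.val.toNat := by
  constructor
  · rintro rfl; rfl
  · intro h; exact Char.ext (UInt32.toNat_inj.mp h)

-- code points of every character the two tests mention
theorem pvN_a : ('a' : Char).val.toNat = 97 := rfl
theorem pvN_b : ('b' : Char).val.toNat = 98 := rfl
theorem pvN_c : ('c' : Char).val.toNat = 99 := rfl
theorem pvN_d : ('d' : Char).val.toNat = 100 := rfl
theorem pvN_e : ('e' : Char).val.toNat = 101 := rfl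
theorem pvN_f : ('f' : Char).val.toNat = 102 := rfl
theorem pvN_A : ('A' : Char).val.toNat = 65 := rfl
theorem pvN_B : ('B' : Char).val.toNat = 66 := rfl
theorem pvN_C : ('C' : Char).val.toNat = 67 := rfl
theorem pvN_D : ('D' : Char).val.toNat = 68 := rfl
theorem pvN_E : ('E' : Char).val.toNat = 69 := rfl
theorem pvN_F : ('F' : Char).val.toNat = 70 := rfl
theorem pvN_0 : ('0' : Char).val.toNat = 48 := rfl
theorem pvN_1 : ('1' : Char).val.toNat = 49 := rfl
theorem pvN_2 : ('2' : Char).val.toNat = 50 := rfl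
theorem pvN_3 : ('3' : Char).val.toNat = 51 := rfl
theorem pvN_4 : ('4' : Char).val.toNat = 52 := rfl
theorem pvN_5 : ('5' : Char).val.toNat = 53 := rfl
theorem pvN_6 : ('6' : Char).val.toNat = 54 := rfl
theorem pvN_7 : ('7' : Char).val.toNat = 55 := rfl
theorem pvN_8 : ('8' : Char).val.toNat = 56 := rfl
theorem pvN_9 : ('9' : Char).val.toNat = 57 := rfl

-- A's membership test agrees with B's regex character class on every character
theorem pv_mem_eq_class (c : Char) :
    ("abcdefABCDEF1234567890".toList.contains c) = pvHexClass c := by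
  have hlist : "abcdefABCDEF1234567890".toList =
      ['a','b','c','d','e','f','A','B','C','D','E','F','1','2','3','4','5','6','7','8','9','0'] := by
    decide
  rcases c with ⟨v, hv⟩
  rw [hlist, Bool.eq_iff_iff]
  simp only [List.contains_eq_mem, decide_eq_true_eq, List.mem_cons, List.not_mem_nil, or_false,
    pv_char_mk_eq_iff, pvHexClass, Bool.or_eq_true, Bool.and_eq_true, Char.le_def,
    UInt32.le_iff_toNat_le,
    pvN_a, pvN_b, pvN_c, pvN_d, pvN_e, pvN_f, pvN_A, pvN_B, pvN_C, pvN_D, pvN_E, pvN_F,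
    pvN_0, pvN_1, pvN_2, pvN_3, pvN_4, pvN_5, pvN_6, pvN_7, pvN_8, pvN_9]
  omega

-- A's early-return loop computes the same as B's all-quantified class check
theorem pv_loopA_eq_all (cs : List Char) : pvLoopA cs = cs.all pvHexClass := by
  induction cs with
  | nil => rfl
  | cons a rest ih =>
      simp only [pvLoopA, List.all_cons, ← ih, pv_mem_eq_class a]
      by_cases h : pvHexClass a = true <;> simp [h]

-- ===== VERDICT (by name: the statement is the Claim_ definition above) =====
theorem is_valid_IPv6_hextet_spec : Claim_equal_is_valid_IPv6_hextet := by
  intro hextet _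
  show is_valid_IPv6_hextet hextet = is_valid_IPv6_hextet_alt hextet
  unfold is_valid_IPv6_hextet is_valid_IPv6_hextet_alt
  simp only [pv_loopA_eq_all]
  by_cases h : hextet.toList.length = 0 ∨ hextet.toList.length > 4
  · rw [if_pos h]
    rcases h with h | h
    · rw [decide_eq_false (by omega : ¬ (1 ≤ hextet.toList.length))]
      simp
    · rw [decide_eq_false (by omega : ¬ (hextet.toList.length ≤ 4))]
      simp
  · rw [if_neg h]
    rw [decide_eq_true (by omega : 1 ≤ hextet.toList.length),
        decide_eq_true (by omega : hextet.toList.length ≤ 4)]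
    simp
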